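-- pv_equiv track=rewrite | github.com/tnakaicode/jburkardt-python | chrpak/chrpak.py | i4_length
-- ===== SOURCE A (Python) =====
-- def i4_length ( i4 ):
--
-- #*****************************************************************************80
-- #
-- ## I4_LENGTH computes the number of characters needed to print an I4.
-- #
-- #  Example:
-- #
-- #        I4    I4_LENGTH
-- #
-- #         0       1
-- #         1       1
-- #        -1       2
-- #      1952       4
-- #    123456       6
-- #
-- #  Licensing:
-- #
-- #    This code is distributed under the GNU LGPL license.
-- #
-- #  Modified:
-- #
-- #    30 January 2016
-- #
-- #  Author:
-- #
-- #    John Burkardt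
-- #
-- #  Parameters:
-- #
-- #    Input, integer I, the integer whose length is desired.
-- #
-- #    Output, integer VALUE, the number of characters required
-- #    to print the integer.
-- #
--
-- #
-- #  Ensure that I4 is an integer.
-- #
--   i4 = int ( i4 )
--
--   if ( i4 < 0 ):
--     value = 1
--     i4 = - i4
--   elif ( i4 == 0 ):
--     value = 1
--     return value
--   else:
--     value = 0
--
--   while ( i4 != 0 ):
--     value = value + 1
--     i4 = ( i4 // 10 )
--
--   return value
-- ===== SOURCE B (Python) =====
-- def i4_length ( i4 ):
--   i4 = int ( i4 )
--   return len ( str ( abs ( i4 ) ) ) + ( 1 if i4 < 0 else 0 )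
-- ===== Notes on version B (the rewrite author's own statement) =====
-- stated objective: idiomatic
-- what changed: Replaces the arithmetic digit-stripping while loop with the length of the decimal string of the absolute value plus a sign term, so there is no loop at all.
import Mathlib
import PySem

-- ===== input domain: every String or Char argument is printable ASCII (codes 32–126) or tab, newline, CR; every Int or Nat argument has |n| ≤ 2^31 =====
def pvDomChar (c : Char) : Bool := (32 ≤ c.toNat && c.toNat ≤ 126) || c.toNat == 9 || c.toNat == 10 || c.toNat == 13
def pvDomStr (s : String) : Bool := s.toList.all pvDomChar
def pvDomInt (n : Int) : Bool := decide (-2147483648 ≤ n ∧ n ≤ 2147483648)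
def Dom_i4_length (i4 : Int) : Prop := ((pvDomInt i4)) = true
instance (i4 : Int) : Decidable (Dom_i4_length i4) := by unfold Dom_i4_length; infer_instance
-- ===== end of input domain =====

-- B replaces A's arithmetic digit-stripping while loop by the length of the
-- decimal string of |i4| plus a sign term (idiomatic; no loop).

-- ===== PORT A =====
-- A's while loop; it is only ever entered with a nonnegative value (A negates
-- negatives first), where Python's '// 10' is exactly Nat division, so the
-- loop state is carried as a Nat.
def i4_length_loop (i4 : Nat) (value : Int) : Int :=
  if i4 ≠ 0 then i4_length_loop (i4 / 10) (value + 1) else value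

def i4_length (i4 : Int) : Int :=
  if i4 < 0 then i4_length_loop (-i4).toNat 1
  else if i4 = 0 then 1
  else i4_length_loop i4.toNat 0

-- ===== PORT B =====
def i4_length_alt (i4 : Int) : Int :=
  PySem.Str.len (PySem.Int.toStr (i4.natAbs : Int)) + (if i4 < 0 then 1 else 0)

-- ===== PRECONDITION & SPEC =====
def Spec_i4_length (i4 : Int) (out : Int) : Prop := out = i4_length_alt i4
instance (i4 : Int) (out : Int) : Decidable (Spec_i4_length i4 out) := by unfold Spec_i4_length; infer_instance

-- ===== CLAIM (what is proved, stated in full; the proofs are below) =====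
def Claim_equal_i4_length : Prop := ∀ (i4 : Int), Dom_i4_length i4 → Spec_i4_length i4 (i4_length i4)

-- ===== LEMMAS AND PROOFS =====

-- digit count with dcount 0 = 0 (proof-only helper)
def dcount (n : Nat) : Nat :=
  if n = 0 then 0 else dcount (n / 10) + 1

theorem i4_length_loop_eq (n : Nat) (v : Int) : i4_length_loop n v = v + dcount n := by
  induction n using Nat.strong_induction_on generalizing v with
  | _ n ih =>
    unfold i4_length_loop dcount
    by_cases h : n = 0
    · simp [h]
    · have hlt : n / 10 < n := Nat.div_lt_self (Nat.pos_of_ne_zero h) (by omega)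
      simp [h, ih _ hlt]
      ring

theorem toDigitsCore_len (f : Nat) : ∀ (n : Nat) (l : List Char), n < f →
    (Nat.toDigitsCore 10 f n l).length = l.length + max 1 (dcount n) := by
  induction f with
  | zero => intro n l h; omega
  | succ f ih =>
    intro n l h
    unfold Nat.toDigitsCore
    by_cases h0 : n / 10 = 0
    · simp only [h0, if_true, List.length_cons]
      rw [dcount]
      by_cases hn : n = 0
      · simp [hn]
      · simp [hn, h0, dcount]
    · simp only [h0, if_false]
      have hn : n ≠ 0 := by intro hn; simp [hn] at h0
      have hlt : n / 10 < n := Nat.div_lt_self (Nat.pos_of_ne_zero hn) (by omega)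
      rw [ih (n / 10) _ (by omega)]
      simp only [List.length_cons]
      conv_rhs => rw [dcount, if_neg hn]
      have : dcount (n / 10) ≠ 0 := by rw [dcount, if_neg h0]; omega
      omega

theorem len_toStr_nat (n : Nat) :
    PySem.Str.len (PySem.Int.toStr (n : Int)) = (max 1 (dcount n) : Nat) := by
  rw [PySem.Str.len]
  rw [show (PySem.Int.toStr (n : Int)).toList = PySem.Int.toChars (n : Int) from
    PySem.Int.toList_toStr _]
  simp only [PySem.Int.toChars]
  rw [if_neg (by omega), show ((n : Int)).toNat = n by omega]
  rw [Nat.toDigits, toDigitsCore_len (n + 1) n [] (by omega)]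
  simp

theorem alt_val (i4 : Int) :
    i4_length_alt i4 = ((max 1 (dcount i4.natAbs) : Nat) : Int) + (if i4 < 0 then 1 else 0) := by
  unfold i4_length_alt
  rw [len_toStr_nat]

theorem dcount_ne_zero {n : Nat} (h : n ≠ 0) : dcount n ≠ 0 := by
  rw [dcount, if_neg h]; omega

-- ===== VERDICT (by name: the statement is the Claim_ definition above) =====
theorem i4_length_spec : Claim_equal_i4_length := by
  intro i4 _
  unfold Spec_i4_length i4_length
  rw [alt_val]
  by_cases hneg : i4 < 0
  · rw [if_pos hneg, if_pos hneg, i4_length_loop_eq]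
    have hn : i4.natAbs = (-i4).toNat := by omega
    have hd := dcount_ne_zero (n := (-i4).toNat) (by omega)
    rw [hn]
    omega
  · rw [if_neg hneg, if_neg hneg]
    by_cases h0 : i4 = 0
    · rw [if_pos h0, h0]
      have : dcount (0 : Int).natAbs = 0 := by rw [dcount]; simp
      rw [this]
      simp
    · rw [if_neg h0, i4_length_loop_eq]
      have hn : i4.natAbs = i4.toNat := by omega
      have hd := dcount_ne_zero (n := i4.toNat) (by omega)
      rw [hn]
      omega
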